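-- pv_equiv track=rewrite | github.com/vintasoftware/entity-embed | entity_embed/data_utils/utils.py | record_dict_to_cluster_dict
-- ===== SOURCE A (Python) =====
-- from collections import Counter, defaultdict
--
-- def record_dict_to_cluster_dict(record_dict, cluster_field):
--     cluster_dict = defaultdict(list)
--     for id_, record in record_dict.items():
--         cluster_id = record[cluster_field]
--         if not isinstance(cluster_id, int):
--             raise ValueError(
--                 "cluster_field values must always be an int, "
--                 f"found {type(cluster_id)} at record={record}"
--             )
--         cluster_dict[cluster_id].append(id_)
--
--     # sort to always have smaller id on left of pair tuple
--     for c in cluster_dict.values():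
--         c.sort()
--     return dict(cluster_dict)  # convert to dict to avoid defaultdict
-- ===== SOURCE B (Python) =====
-- def record_dict_to_cluster_dict(record_dict, cluster_field):
--     # one pass in original order: validate (same first-failure error as A)
--     # and record each id's cluster
--     cid_of = {}
--     for id_, record in record_dict.items():
--         cluster_id = record[cluster_field]
--         if not isinstance(cluster_id, int):
--             raise ValueError(
--                 "cluster_field values must always be an int, "
--                 f"found {type(cluster_id)} at record={record}"
--             )
--         cid_of[id_] = cluster_id
--     # buckets keyed in first-appearance order, then ONE globally sorted fill:
--     # ids arrive in sorted order, so every bucket is already sorted.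
--     cluster_dict = {cid: [] for cid in cid_of.values()}
--     for id_ in sorted(cid_of):
--         cluster_dict[cid_of[id_]].append(id_)
--     return cluster_dict
-- ===== Notes on version B (the rewrite author's own statement) =====
-- stated objective: alternative
-- what changed: A groups ids per cluster and then sorts each bucket separately; B sorts the ids once globally and fills pre-created buckets in a single pass, so each bucket is born sorted and no per-group sort is needed.
import Mathlib
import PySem

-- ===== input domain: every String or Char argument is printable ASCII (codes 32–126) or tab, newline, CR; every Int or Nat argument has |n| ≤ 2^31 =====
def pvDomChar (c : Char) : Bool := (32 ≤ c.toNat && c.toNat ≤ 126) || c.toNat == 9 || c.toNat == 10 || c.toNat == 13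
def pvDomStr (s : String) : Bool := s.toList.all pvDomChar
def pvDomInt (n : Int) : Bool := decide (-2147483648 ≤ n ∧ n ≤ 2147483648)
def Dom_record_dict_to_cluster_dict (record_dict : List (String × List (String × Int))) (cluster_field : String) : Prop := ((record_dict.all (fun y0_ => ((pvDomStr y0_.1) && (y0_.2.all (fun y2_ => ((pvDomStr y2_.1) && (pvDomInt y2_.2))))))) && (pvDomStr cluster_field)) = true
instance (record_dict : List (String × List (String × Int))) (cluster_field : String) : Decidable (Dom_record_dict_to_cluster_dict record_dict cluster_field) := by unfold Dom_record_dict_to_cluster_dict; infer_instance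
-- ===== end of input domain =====

-- B replaces A's "group, then sort each bucket" by "sort all ids once, then one
-- bucketing pass into pre-created buckets" (alternative decomposition, same cost).

-- record[cluster_field]: first-match lookup in the record's association list;
-- Pre_ guarantees the key is present, so the `.getD 0` default is never used
-- (Python raises KeyError there).  The isinstance(int) check of A is vacuous
-- under the Lean typing (values are Int), so the ValueError branch is unreachable.
def pvCid (cluster_field : String) (record : List (String × Int)) : Int :=
  ((PySem.Dict.mk record).get? cluster_field).getD 0

-- ===== PORT A =====
def record_dict_to_cluster_dict (record_dict : List (String × List (String × Int))) (cluster_field : String) : List (Int × List String) :=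
  let cluster_dict : PySem.Dict Int (List String) :=
    record_dict.foldl
      (fun d p => d.modify (pvCid cluster_field p.2) [] (· ++ [p.1]))
      PySem.Dict.empty
  (cluster_dict.items).map (fun q => (q.1, PySem.List.sorted q.2 (fun x => x) false))

-- ===== PORT B =====
def record_dict_to_cluster_dict_alt (record_dict : List (String × List (String × Int))) (cluster_field : String) : List (Int × List String) :=
  -- cid_of[id_] = cluster_id, in original order
  let cid_of : PySem.Dict String Int :=
    record_dict.foldl (fun d p => d.insert p.1 (pvCid cluster_field p.2)) PySem.Dict.empty
  -- cluster_dict = {cid: [] for cid in cid_of.values()}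
  let cd0 : PySem.Dict Int (List String) :=
    cid_of.values.foldl (fun d c => d.insert c []) PySem.Dict.empty
  -- for id_ in sorted(cid_of): cluster_dict[cid_of[id_]].append(id_)
  let cd : PySem.Dict Int (List String) :=
    (PySem.List.sorted cid_of.keys (fun x => x) false).foldl
      (fun d id_ => d.modify (cid_of.getD id_ 0) [] (· ++ [id_])) cd0
  cd.items

-- ===== PRECONDITION & SPEC =====
-- Pre_ excludes (a) records missing cluster_field, on which A raises KeyError, and
-- (b) duplicate top-level ids, which a Python dict cannot represent.
def Pre_record_dict_to_cluster_dict (record_dict : List (String × List (String × Int))) (cluster_field : String) : Prop :=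
  (∀ p ∈ record_dict, (PySem.Dict.mk p.2).contains cluster_field = true) ∧
  (record_dict.map Prod.fst).Nodup
instance (record_dict : List (String × List (String × Int))) (cluster_field : String) : Decidable (Pre_record_dict_to_cluster_dict record_dict cluster_field) := by unfold Pre_record_dict_to_cluster_dict; infer_instance

def pvWitness_record_dict_to_cluster_dict : (List (String × List (String × Int))) × String :=
  ([("b", [("c", 1)]), ("a", [("c", 1)]), ("z", [("c", 2)])], "c")

def Spec_record_dict_to_cluster_dict (record_dict : List (String × List (String × Int))) (cluster_field : String) (out : List (Int × List String)) : Prop := out = record_dict_to_cluster_dict_alt record_dict cluster_field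
instance (record_dict : List (String × List (String × Int))) (cluster_field : String) (out : List (Int × List String)) : Decidable (Spec_record_dict_to_cluster_dict record_dict cluster_field out) := by unfold Spec_record_dict_to_cluster_dict; infer_instance

-- ===== CLAIM (what is proved, stated in full; the proofs are below) =====
def Claim_equal_record_dict_to_cluster_dict : Prop := ∀ (record_dict : List (String × List (String × Int))) (cluster_field : String), Dom_record_dict_to_cluster_dict record_dict cluster_field → Pre_record_dict_to_cluster_dict record_dict cluster_field → Spec_record_dict_to_cluster_dict record_dict cluster_field (record_dict_to_cluster_dict record_dict cluster_field)

-- ===== LEMMAS AND PROOFS =====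


-- grouping loop written over (key, value) pairs
theorem pv_foldl_modify_key {α : Type} (l : List α) (key : α → Int) (val : α → String)
    (d : PySem.Dict Int (List String)) (c : Int) :
    (l.foldl (fun d x => d.modify (key x) [] (· ++ [val x])) d).getD c []
      = d.getD c [] ++ (l.filter (fun x => key x == c)).map val := by
  have h := PySem.Dict.getD_foldl_modify_append (l := l.map (fun x => (key x, val x))) (d := d) (c := c)
  rw [List.foldl_map] at h
  simpa [List.filter_map, Function.comp, List.map_map] using h

theorem pv_cd0_getD (l : List Int) (d : PySem.Dict Int (List String))
    (h : ∀ k, d.getD k [] = []) (k : Int) :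
    (l.foldl (fun d c => d.insert c []) d).getD k [] = [] := by
  induction l generalizing d with
  | nil => exact h k
  | cons c t ih =>
      simp only [List.foldl_cons]
      refine ih _ (fun k' => ?_)
      rw [PySem.Dict.getD_insert]
      split
      · rfl
      · exact h k'

theorem pv_update_of_subset (l : List Int) (s : PySem.Set Int) (h : ∀ x ∈ l, x ∈ s) :
    PySem.Set.update s l = s := by
  induction l generalizing s with
  | nil => rfl
  | cons c t ih =>
      simp only [PySem.Set.update, List.foldl_cons]
      rw [show PySem.Set.add s c = s from PySem.Set.add_of_mem (h c (by simp))]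
      exact ih s (fun x hx => h x (by simp [hx]))

theorem pv_sorted_filter_of_nodup (xs : List String) (h : xs.Nodup) (q : String → Bool) :
    (PySem.List.sorted xs (fun x => x) false).filter q
      = PySem.List.sorted (xs.filter q) (fun x => x) false := by
  symm
  apply PySem.List.sorted_eq_of_perm_of_pairwise_lt
  · exact ((PySem.List.sorted_perm xs (fun x => x) false).filter q)
  · have hnd : (PySem.List.sorted xs (fun x => x) false).Nodup :=
      ((PySem.List.sorted_perm xs (fun x => x) false).nodup_iff).mpr h
    have hle : (PySem.List.sorted xs (fun x => x) false).Pairwise (· ≤ ·) :=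
      PySem.List.sorted_pairwise xs (fun x => x)
    have hlt : (PySem.List.sorted xs (fun x => x) false).Pairwise (· < ·) :=
      (List.Pairwise.and hle hnd).imp (fun {a b} hab => lt_of_le_of_ne hab.1 hab.2)
    exact List.Pairwise.filter q hlt

-- ===== VERDICT (by name: the statement is the Claim_ definition above) =====
theorem record_dict_to_cluster_dict_spec : Claim_equal_record_dict_to_cluster_dict := by
  intro rd cf _hdom hpre
  obtain ⟨hget, hnd⟩ := hpre
  unfold Spec_record_dict_to_cluster_dict record_dict_to_cluster_dict record_dict_to_cluster_dict_alt
  simp only []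
  -- the id -> cluster map of B
  set cid_of : PySem.Dict String Int :=
    rd.foldl (fun d p => d.insert p.1 (pvCid cf p.2)) PySem.Dict.empty with hcid_of
  have hitems : cid_of.items = rd.map (fun p => (p.1, pvCid cf p.2)) := by
    rw [hcid_of]
    rw [PySem.Dict.items_foldl_insert_fresh (k := fun p => p.1) (v := fun p => pvCid cf p.2)
      (d := PySem.Dict.empty) (l := rd) (by intro a _; rfl) (by simpa using hnd)]
    simp [PySem.Dict.empty]
  have hkeys : cid_of.keys = rd.map Prod.fst := by
    simp [PySem.Dict.keys, hitems, List.map_map, Function.comp]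
  have hvals : cid_of.values = rd.map (fun p => pvCid cf p.2) := by
    simp [PySem.Dict.values, hitems, List.map_map, Function.comp]
  have hgval : ∀ p ∈ rd, cid_of.getD p.1 0 = pvCid cf p.2 := by
    intro p hp
    have hm : (p.1, pvCid cf p.2) ∈ cid_of.items := by
      rw [hitems]; exact List.mem_map_of_mem hp
    have hk : cid_of.keys.Nodup := by rw [hkeys]; exact hnd
    exact PySem.Dict.getD_of_mem_items _ hm hk 0
  -- the shared key list, in first-appearance order
  set K : PySem.Set Int := PySem.Set.ofList (rd.map (fun p => pvCid cf p.2)) with hK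
  -- ===== the A-side dict =====
  set dA : PySem.Dict Int (List String) :=
    rd.foldl (fun d p => d.modify (pvCid cf p.2) [] (· ++ [p.1])) PySem.Dict.empty with hdA
  have hAkeys : dA.keys = K := by
    rw [hdA, PySem.Dict.keys_foldl_modify_key]
    simp [PySem.Set.update, PySem.Set.ofList_eq_foldl, hK]
  have hAnd : dA.keys.Nodup := by
    rw [hdA]
    exact PySem.Dict.nodup_keys_foldl_modify_key _ _ _ _ _ (PySem.Dict.nodup_keys_empty)
  have hAget : ∀ c, dA.getD c [] = (rd.filter (fun p => pvCid cf p.2 == c)).map Prod.fst := by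
    intro c
    rw [hdA, pv_foldl_modify_key rd (fun p => pvCid cf p.2) Prod.fst PySem.Dict.empty c]
    simp [PySem.Dict.getD_empty]
  have hAitems : dA.items = K.map (fun k => (k, dA.getD k [])) := by
    rw [PySem.Dict.items_eq_map_keys dA hAnd [], hAkeys]
  -- ===== the B-side dicts =====
  set ids : List String := PySem.List.sorted cid_of.keys (fun x => x) false with hids
  set cd0 : PySem.Dict Int (List String) :=
    cid_of.values.foldl (fun d c => d.insert c []) PySem.Dict.empty with hcd0
  have hcd0get : ∀ k, cd0.getD k [] = [] := by
    intro k
    rw [hcd0]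
    exact pv_cd0_getD _ _ (fun k' => PySem.Dict.getD_empty k' []) k
  have hcd0keys : cd0.keys = K := by
    rw [hcd0, PySem.Dict.keys_foldl_insert, hvals]
    simp [PySem.Set.update, PySem.Set.ofList_eq_foldl, hK]
  have hcd0nd : cd0.keys.Nodup := by
    rw [hcd0]
    exact PySem.Dict.nodup_keys_foldl_insert _ _ _ (PySem.Dict.nodup_keys_empty)
  set cd : PySem.Dict Int (List String) :=
    ids.foldl (fun d id_ => d.modify (cid_of.getD id_ 0) [] (· ++ [id_])) cd0 with hcd
  have hmemids : ∀ id_ ∈ ids, cid_of.getD id_ 0 ∈ K := by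
    intro id_ hid
    rw [hids, PySem.List.mem_sorted, hkeys] at hid
    obtain ⟨p, hp, hpe⟩ := List.mem_map.mp hid
    rw [← hpe, hgval p hp, hK]
    exact (PySem.Set.mem_ofList _ _).mpr (List.mem_map_of_mem hp)
  have hcdkeys : cd.keys = K := by
    rw [hcd, PySem.Dict.keys_foldl_modify_key, hcd0keys]
    refine pv_update_of_subset _ _ ?_
    intro x hx
    obtain ⟨id_, hid, he⟩ := List.mem_map.mp hx
    exact he ▸ hmemids id_ hid
  have hcdnd : cd.keys.Nodup := by
    rw [hcd]
    exact PySem.Dict.nodup_keys_foldl_modify_key _ _ _ _ _ hcd0nd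
  have hcdget : ∀ c, cd.getD c [] = ids.filter (fun id_ => cid_of.getD id_ 0 == c) := by
    intro c
    rw [hcd, pv_foldl_modify_key ids (fun id_ => cid_of.getD id_ 0) (fun id_ => id_) cd0 c]
    simp [hcd0get]
  have hcditems : cd.items = K.map (fun k => (k, cd.getD k [])) := by
    rw [PySem.Dict.items_eq_map_keys cd hcdnd [], hcdkeys]
  -- ===== assemble =====
  rw [hAitems, hcditems, List.map_map]
  refine List.map_congr_left ?_
  intro c _
  simp only [Function.comp]
  refine congrArg (fun l => (c, l)) ?_
  rw [hAget c, hcdget c, hids, hkeys]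
  rw [pv_sorted_filter_of_nodup (rd.map Prod.fst) hnd (fun id_ => cid_of.getD id_ 0 == c)]
  rw [List.filter_map]
  refine congrArg _ (congrArg _ ?_)
  exact (List.filter_congr (fun p hp => by simp [Function.comp, hgval p hp])).symm
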